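-- pv_equiv track=rewrite | github.com/chenghuige/Google-AI4Code-Understand-Code-in-Python-Notebooks | projects/kaggle/ai4code/src/util.py | get_left_texts
-- ===== SOURCE A (Python) =====
-- def get_left_texts(texts, idx, count):
--   start = idx - count
--   end = idx
--   l = []
--   for i in range(start, end):
--     if i < 0:
--       l.append('before')
--     else:
--       l.append(texts[i])
--   return l
-- ===== SOURCE B (Python) =====
-- def get_left_texts(texts, idx, count):
--     if count <= 0:
--         return []
--     buf = ['before'] * count + texts[:max(idx, 0)]
--     return buf[len(buf) - count:]
-- ===== Notes on version B (the rewrite author's own statement) =====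
-- stated objective: alternative
-- what changed: Instead of looping over the index range with a per-element negativity branch, B builds an oversized buffer (count 'before' pads prepended to the texts prefix up to idx) and returns its last-count suffix slice; no index loop or branch remains.
import Mathlib
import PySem

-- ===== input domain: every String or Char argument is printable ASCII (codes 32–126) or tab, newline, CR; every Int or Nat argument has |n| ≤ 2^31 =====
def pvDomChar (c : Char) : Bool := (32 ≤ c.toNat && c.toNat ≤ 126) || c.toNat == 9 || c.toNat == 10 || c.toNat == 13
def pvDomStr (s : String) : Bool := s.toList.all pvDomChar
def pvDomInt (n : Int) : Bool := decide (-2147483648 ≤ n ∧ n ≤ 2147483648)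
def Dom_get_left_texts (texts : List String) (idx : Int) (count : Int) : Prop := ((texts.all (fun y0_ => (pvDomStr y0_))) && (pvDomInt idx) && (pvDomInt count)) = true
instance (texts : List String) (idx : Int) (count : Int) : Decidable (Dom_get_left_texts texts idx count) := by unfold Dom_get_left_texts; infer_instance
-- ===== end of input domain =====

-- B replaces A's per-index loop with its negativity branch by a buffer construction:
-- prepend count 'before' pads to the texts prefix up to idx and return the last-count suffix slice.

-- ===== PORT A =====
def get_left_texts (texts : List String) (idx : Int) (count : Int) : List String :=
  let start := idx - count
  (PySem.List.pyRange start idx 1).foldl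
    (fun l i => if i < 0 then l ++ ["before"] else l ++ [PySem.List.pyGetD texts i ""]) []

-- ===== PORT B =====
def get_left_texts_alt (texts : List String) (idx : Int) (count : Int) : List String :=
  if count ≤ 0 then []
  else
    let buf := List.replicate count.toNat "before" ++ PySem.List.slice texts none (some (max idx 0))
    PySem.List.slice buf (some ((PySem.List.len buf) - count)) none

-- ===== PRECONDITION & SPEC =====
-- Pre_ excludes exactly the inputs (count > 0 and idx > len(texts)) on which A raises IndexError.
def Pre_get_left_texts (texts : List String) (idx : Int) (count : Int) : Prop :=
  count ≤ 0 ∨ idx ≤ (texts.length : Int)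
instance (texts : List String) (idx : Int) (count : Int) : Decidable (Pre_get_left_texts texts idx count) := by unfold Pre_get_left_texts; infer_instance

def pvWitness_get_left_texts : List String × Int × Int := (["a", "b"], 2, 4)

def Spec_get_left_texts (texts : List String) (idx : Int) (count : Int) (out : List String) : Prop := out = get_left_texts_alt texts idx count
instance (texts : List String) (idx : Int) (count : Int) (out : List String) : Decidable (Spec_get_left_texts texts idx count out) := by unfold Spec_get_left_texts; infer_instance

-- ===== CLAIM (what is proved, stated in full; the proofs are below) =====
def Claim_equal_get_left_texts : Prop := ∀ (texts : List String) (idx : Int) (count : Int), Dom_get_left_texts texts idx count → Pre_get_left_texts texts idx count → Spec_get_left_texts texts idx count (get_left_texts texts idx count)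

-- ===== LEMMAS AND PROOFS =====

theorem foldl_if_eq_flatMap (texts : List String) (l : List Int) (acc : List String) :
    l.foldl (fun l i => if i < 0 then l ++ ["before"] else l ++ [PySem.List.pyGetD texts i ""]) acc
      = acc ++ l.flatMap (fun i => if i < 0 then ["before"] else [PySem.List.pyGetD texts i ""]) := by
  induction l generalizing acc with
  | nil => simp
  | cons a t ih =>
    simp only [List.foldl_cons, List.flatMap_cons, ih]
    split_ifs <;> simp

theorem flatMap_neg (texts : List String) (l : List Int) (h : ∀ i ∈ l, i < 0) :
    l.flatMap (fun i => if i < 0 then ["before"] else [PySem.List.pyGetD texts i ""])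
      = List.replicate l.length "before" := by
  induction l with
  | nil => rfl
  | cons a t ih =>
    simp only [List.flatMap_cons, List.length_cons, List.replicate_succ]
    rw [if_pos (h a (List.mem_cons_self)), ih (fun i hi => h i (List.mem_cons_of_mem a hi))]
    rfl

theorem flatMap_nonneg (texts : List String) (l : List Int) (h : ∀ i ∈ l, ¬ i < 0) :
    l.flatMap (fun i => if i < 0 then ["before"] else [PySem.List.pyGetD texts i ""])
      = l.map (fun i => PySem.List.pyGetD texts i "") := by
  induction l with
  | nil => rfl
  | cons a t ih =>
    simp only [List.flatMap_cons, List.map_cons]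
    rw [if_neg (h a (List.mem_cons_self)), ih (fun i hi => h i (List.mem_cons_of_mem a hi))]
    rfl

-- A's normal form: padding then the nonnegative-index window, always.
theorem A_norm (texts : List String) (idx count : Int) :
    get_left_texts texts idx count
      = List.replicate (min idx 0 - (idx - count)).toNat "before"
          ++ (PySem.List.pyRange (max (idx - count) 0) idx 1).map
               (fun i => PySem.List.pyGetD texts i "") := by
  unfold get_left_texts
  simp only
  rw [foldl_if_eq_flatMap, List.nil_append]
  have hstart : idx - count = idx - count := rfl
  by_cases hge : idx ≤ idx - count
  · rw [PySem.List.pyRange_one_eq_nil hge,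
        PySem.List.pyRange_one_eq_nil (by omega : idx ≤ max (idx - count) 0)]
    have : (min idx 0 - (idx - count)).toNat = 0 := by omega
    simp [this]
  · push Not at hge
    by_cases hs0 : idx - count < 0
    · have hm1 : idx - count ≤ min idx 0 := by omega
      have hm2 : min idx 0 ≤ idx := min_le_left _ _
      rw [PySem.List.pyRange_one_append (idx - count) (min idx 0) idx hm1 hm2, List.flatMap_append]
      rw [flatMap_neg texts _ (by
        intro i hi
        rw [PySem.List.mem_pyRange_one] at hi
        omega)]
      rw [PySem.List.length_pyRange_one]
      congr 1
      by_cases hidx : idx ≤ 0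
      · rw [show min idx 0 = idx by omega, PySem.List.pyRange_one_eq_nil le_rfl,
            PySem.List.pyRange_one_eq_nil (by omega : idx ≤ max (idx - count) 0)]
        rfl
      · rw [show min idx 0 = 0 by omega, show max (idx - count) 0 = 0 by omega]
        exact flatMap_nonneg texts _ (by
          intro i hi
          rw [PySem.List.mem_pyRange_one] at hi
          omega)
    · push Not at hs0
      have hmax : max (idx - count) 0 = idx - count := by omega
      have hpad : (min idx 0 - (idx - count)).toNat = 0 := by omega
      rw [hmax, hpad]
      simp only [List.replicate_zero, List.nil_append]
      exact flatMap_nonneg texts _ (by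
        intro i hi
        rw [PySem.List.mem_pyRange_one] at hi
        omega)

-- the window of pyGetD values is a drop/take of the list
theorem map_pyGetD_window (xs : List String) (a b : Nat) (hb : b ≤ xs.length) :
    (PySem.List.pyRange (a : Int) (b : Int) 1).map (fun i => PySem.List.pyGetD xs i "")
      = (xs.drop a).take (b - a) := by
  rw [PySem.List.pyRange_one]
  have h1 : (((b : Int) - (a : Int)).toNat) = b - a := by omega
  rw [h1, List.map_map]
  apply List.ext_getElem
  · simp; omega
  · intro k hk1 hk2
    have hk : k < b - a := by simpa using hk1
    simp only [List.getElem_map, List.getElem_range, Function.comp_apply]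
    rw [List.getElem_take, List.getElem_drop]
    rw [PySem.List.pyGetD_eq_getElem xs "" (by omega) (by omega)]
    congr 1


-- ===== VERDICT (by name: the statement is the Claim_ definition above) =====
theorem get_left_texts_spec : Claim_equal_get_left_texts := by
  intro texts idx count _ hpre
  unfold Spec_get_left_texts get_left_texts_alt
  rw [A_norm]
  by_cases hc : count ≤ 0
  · rw [if_pos hc, PySem.List.pyRange_one_eq_nil (by omega : idx ≤ max (idx - count) 0)]
    have : (min idx 0 - (idx - count)).toNat = 0 := by omega
    simp [this]
  · rw [if_neg hc]
    push Not at hc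
    have hlen : idx ≤ (texts.length : Int) := by
      rcases hpre with h | h
      · omega
      · exact h
    simp only
    set t : Nat := (max idx 0).toNat with ht
    have htake : PySem.List.slice texts none (some (max idx 0)) = texts.take t := by
      rw [PySem.List.slice_to texts (by omega)]
    rw [htake]
    have htlen : (texts.take t).length = t := by
      rw [List.length_take]; omega
    have hlenbuf : PySem.List.len (List.replicate count.toNat "before" ++ texts.take t)
        - count = (t : Int) := by
      simp [PySem.List.len_eq, htlen]
      omega
    rw [hlenbuf, PySem.List.slice_from _ (by omega), Int.toNat_natCast]
    by_cases hidx : idx ≤ 0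
    · -- t = 0 : all padding
      have ht0 : t = 0 := by omega
      rw [ht0, PySem.List.pyRange_one_eq_nil (by omega : idx ≤ max (idx - count) 0)]
      have : (min idx 0 - (idx - count)).toNat = count.toNat := by omega
      simp [this]
    · push Not at hidx
      have ht' : (t : Int) = idx := by omega
      by_cases hs : 0 ≤ idx - count
      · -- no padding; the drop passes the whole replicate and eats into the prefix
        have hpad : (min idx 0 - (idx - count)).toNat = 0 := by omega
        have hR : List.drop t (List.replicate count.toNat "before" ++ List.take t texts)
            = List.take (t - (t - count.toNat)) (List.drop (t - count.toNat) texts) := by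
          rw [List.drop_append,
              List.drop_eq_nil_of_le (by rw [List.length_replicate]; omega),
              List.nil_append, List.length_replicate, List.drop_take]
        rw [hpad, hR]
        simp only [List.replicate_zero, List.nil_append]
        rw [show max (idx - count) 0 = (((t - count.toNat : Nat) : Nat) : Int) by omega,
            show idx = ((t : Nat) : Int) by omega,
            map_pyGetD_window texts _ _ (by omega)]
      · -- padding remains: the drop stays inside the replicate
        push Not at hs
        have hpad : (min idx 0 - (idx - count)).toNat = count.toNat - t := by omega
        have hR : List.drop t (List.replicate count.toNat "before" ++ List.take t texts)
            = List.replicate (count.toNat - t) "before" ++ List.take t texts := by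
          rw [List.drop_append_of_le_length (by rw [List.length_replicate]; omega),
              List.drop_replicate]
        rw [hpad, hR, show max (idx - count) 0 = (((0 : Nat) : Nat) : Int) by omega,
            show idx = ((t : Nat) : Int) by omega,
            map_pyGetD_window texts _ _ (by omega)]
        simp only [List.drop_zero, Nat.sub_zero]
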